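-- pv_equiv track=rewrite | github.com/beastNico/DIGITAL-BANKING-DASHBOARD | app.py | build_brand_palette
-- ===== SOURCE A (Python) =====
-- def build_brand_palette(apps: list[str]) -> dict[str, str]:
--     palette = {}
--     idx = 0
--     for app in apps:
--         if app in BRAND_COLORS:
--             palette[app] = BRAND_COLORS[app]
--         else:
--             palette[app] = DEFAULT_CYCLE[idx % len(DEFAULT_CYCLE)]
--             idx += 1
--     return palette
--
-- BRAND_COLORS = {
--     "Barclays": "#00AEEF",
--     "HSBC": "#F08D3C",
--     "Lloyds": "#11703F",
--     "Monzo": "#14233C",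
--     "Revolut": "#7D4CAC",
--     "Santander": "#EC0000",
-- }
--
-- DEFAULT_CYCLE = [
--     "#4E79A7", "#F28E2B", "#E15759", "#76B7B2", "#59A14F",
--     "#EDC948", "#B07AA1", "#FF9DA7", "#9C755F", "#BAB0AC",
-- ]
-- ===== SOURCE B (Python) =====
-- BRAND_COLORS = {
--     "Barclays": "#00AEEF",
--     "HSBC": "#F08D3C",
--     "Lloyds": "#11703F",
--     "Monzo": "#14233C",
--     "Revolut": "#7D4CAC",
--     "Santander": "#EC0000",
-- }
--
-- DEFAULT_CYCLE = [
--     "#4E79A7", "#F28E2B", "#E15759", "#76B7B2", "#59A14F",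
--     "#EDC948", "#B07AA1", "#FF9DA7", "#9C755F", "#BAB0AC",
-- ]
--
--
-- def build_brand_palette(apps: list[str]) -> dict[str, str]:
--     # stateless: the cycle slot of position i is the number of non-brand
--     # entries strictly before i, so no running counter is needed
--     return {
--         app: BRAND_COLORS.get(
--             app,
--             DEFAULT_CYCLE[sum(b not in BRAND_COLORS for b in apps[:i]) % len(DEFAULT_CYCLE)],
--         )
--         for i, app in enumerate(apps)
--     }
-- ===== Notes on version B (the rewrite author's own statement) =====
-- stated objective: alternative
-- what changed: Replaces A's stateful loop with a running idx counter by a single stateless dict comprehension that computes each non-brand app's cycle slot as the count of non-brand entries in the prefix before its position.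
import Mathlib
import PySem

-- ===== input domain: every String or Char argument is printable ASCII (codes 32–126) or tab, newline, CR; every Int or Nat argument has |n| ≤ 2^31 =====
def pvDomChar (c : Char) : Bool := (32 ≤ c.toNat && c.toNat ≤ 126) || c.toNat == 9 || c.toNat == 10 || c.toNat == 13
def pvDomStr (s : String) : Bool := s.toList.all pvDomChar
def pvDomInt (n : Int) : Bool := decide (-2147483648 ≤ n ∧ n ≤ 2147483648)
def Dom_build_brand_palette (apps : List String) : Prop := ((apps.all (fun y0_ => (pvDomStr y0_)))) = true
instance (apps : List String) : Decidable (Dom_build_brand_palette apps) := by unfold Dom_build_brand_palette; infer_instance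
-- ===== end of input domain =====

-- B replaces A's running idx counter by a stateless comprehension (cycle slot = count of
-- non-brand entries before the position); alternative decomposition, equal return value.

-- shared module constants
def pvBRAND : PySem.Dict String String := PySem.Dict.ofList
  [("Barclays", "#00AEEF"), ("HSBC", "#F08D3C"), ("Lloyds", "#11703F"),
   ("Monzo", "#14233C"), ("Revolut", "#7D4CAC"), ("Santander", "#EC0000")]

def pvCYCLE : List String :=
  ["#4E79A7", "#F28E2B", "#E15759", "#76B7B2", "#59A14F",
   "#EDC948", "#B07AA1", "#FF9DA7", "#9C755F", "#BAB0AC"]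

-- ===== PORT A =====
-- loop 'for app in apps' with state (palette, idx); DEFAULT_CYCLE[idx % len] is always in
-- range for idx ≥ 0, ported as pyGetD (exact there); BRAND_COLORS[app] under the contains
-- guard is getD (exact: the key is present)
def build_brand_palette (apps : List String) : List (String × String) :=
  (List.foldl
    (fun (st : PySem.Dict String String × Int) app =>
      if PySem.Dict.contains pvBRAND app then
        (PySem.Dict.insert st.1 app (PySem.Dict.getD pvBRAND app ""), st.2)
      else
        (PySem.Dict.insert st.1 app
          (PySem.List.pyGetD pvCYCLE (PySem.Int.mod st.2 (PySem.List.len pvCYCLE)) ""),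
         st.2 + 1))
    (PySem.Dict.empty, 0) apps).1.items

-- ===== PORT B =====
-- dict comprehension over enumerate(apps); apps[:i] is slice, sum(… for …) is countP
def build_brand_palette_alt (apps : List String) : List (String × String) :=
  (List.foldl
    (fun (d : PySem.Dict String String) (p : Int × String) =>
      PySem.Dict.insert d p.2
        (PySem.Dict.getD pvBRAND p.2
          (PySem.List.pyGetD pvCYCLE
            (PySem.Int.mod
              (((PySem.List.slice apps none (some p.1)).countP
                  (fun b => !PySem.Dict.contains pvBRAND b) : Int))
              (PySem.List.len pvCYCLE)) "")))
    PySem.Dict.empty (PySem.List.enumerate apps 0)).items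

-- ===== PRECONDITION & SPEC =====
def Spec_build_brand_palette (apps : List String) (out : List (String × String)) : Prop := out = build_brand_palette_alt apps
instance (apps : List String) (out : List (String × String)) : Decidable (Spec_build_brand_palette apps out) := by unfold Spec_build_brand_palette; infer_instance

-- ===== CLAIM (what is proved, stated in full; the proofs are below) =====
def Claim_equal_build_brand_palette : Prop := ∀ (apps : List String), Dom_build_brand_palette apps → Spec_build_brand_palette apps (build_brand_palette apps)

-- ===== LEMMAS AND PROOFS =====

-- step functions of the two ports (definitionally the lambdas in the ports)
def pvStepA (st : PySem.Dict String String × Int) (app : String) :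
    PySem.Dict String String × Int :=
  if PySem.Dict.contains pvBRAND app then
    (PySem.Dict.insert st.1 app (PySem.Dict.getD pvBRAND app ""), st.2)
  else
    (PySem.Dict.insert st.1 app
      (PySem.List.pyGetD pvCYCLE (PySem.Int.mod st.2 (PySem.List.len pvCYCLE)) ""),
     st.2 + 1)

def pvStepB (apps : List String) (d : PySem.Dict String String) (p : Int × String) :
    PySem.Dict String String :=
  PySem.Dict.insert d p.2
    (PySem.Dict.getD pvBRAND p.2
      (PySem.List.pyGetD pvCYCLE
        (PySem.Int.mod
          (((PySem.List.slice apps none (some p.1)).countP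
              (fun b => !PySem.Dict.contains pvBRAND b) : Int))
          (PySem.List.len pvCYCLE)) ""))

def pvIsDef (b : String) : Bool := !PySem.Dict.contains pvBRAND b

lemma pv_getD_irrel (k : String) (x y : String)
    (h : PySem.Dict.contains pvBRAND k = true) :
    PySem.Dict.getD pvBRAND k x = PySem.Dict.getD pvBRAND k y := by
  rw [PySem.Dict.getD_eq_get?_getD, PySem.Dict.getD_eq_get?_getD,
      PySem.Dict.contains_eq_isSome_get?] at *
  cases hk : PySem.Dict.get? pvBRAND k with
  | none => rw [hk] at h; simp at h
  | some v => simp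

lemma pv_main (suf : List String) : ∀ (pre : List String) (d : PySem.Dict String String),
    (List.foldl pvStepA (d, ((pre.countP pvIsDef : Nat) : Int)) suf).1
      = List.foldl (pvStepB (pre ++ suf)) d
          (PySem.List.enumerate suf (pre.length : Int)) := by
  induction suf with
  | nil => intro pre d; simp [PySem.List.enumerate_nil]
  | cons a t ih =>
    intro pre d
    rw [PySem.List.enumerate_cons]
    have hslice : PySem.List.slice (pre ++ a :: t) none (some (pre.length : Int))
        = pre := by
      rw [PySem.List.slice_to_natCast]
      exact List.take_left
    by_cases hc : PySem.Dict.contains pvBRAND a = true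
    · have hstep : pvStepA (d, ((pre.countP pvIsDef : Nat) : Int)) a
          = (PySem.Dict.insert d a (PySem.Dict.getD pvBRAND a ""),
             ((pre.countP pvIsDef : Nat) : Int)) := by
        simp [pvStepA, hc]
      have hB : pvStepB (pre ++ a :: t) d ((pre.length : Int), a)
          = PySem.Dict.insert d a (PySem.Dict.getD pvBRAND a "") := by
        simp only [pvStepB, hslice]
        rw [pv_getD_irrel a _ _ hc]
      have hcnt : (pre ++ [a]).countP pvIsDef = pre.countP pvIsDef := by
        simp [List.countP_append, pvIsDef, hc]
      have := ih (pre ++ [a]) (PySem.Dict.insert d a (PySem.Dict.getD pvBRAND a ""))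
      rw [hcnt] at this
      simp only [List.append_assoc, List.cons_append, List.nil_append,
        List.length_append, List.length_cons, List.length_nil] at this
      rw [List.foldl_cons, List.foldl_cons, hstep, hB]
      rw [this]
      norm_num
    · have hc' : PySem.Dict.contains pvBRAND a = false := by
        simpa using hc
      have hstep : pvStepA (d, ((pre.countP pvIsDef : Nat) : Int)) a
          = (PySem.Dict.insert d a
              (PySem.List.pyGetD pvCYCLE
                (PySem.Int.mod ((pre.countP pvIsDef : Nat) : Int)
                  (PySem.List.len pvCYCLE)) ""),
             ((pre.countP pvIsDef : Nat) : Int) + 1) := by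
        simp [pvStepA, hc']
      have hB : pvStepB (pre ++ a :: t) d ((pre.length : Int), a)
          = PySem.Dict.insert d a
              (PySem.List.pyGetD pvCYCLE
                (PySem.Int.mod ((pre.countP pvIsDef : Nat) : Int)
                  (PySem.List.len pvCYCLE)) "") := by
        simp only [pvStepB, hslice]
        rw [PySem.Dict.getD_of_not_contains _ _ hc']
        rfl
      have hcnt : ((pre ++ [a]).countP pvIsDef : Int)
          = ((pre.countP pvIsDef : Nat) : Int) + 1 := by
        simp [List.countP_append, pvIsDef, hc']
      have := ih (pre ++ [a]) (PySem.Dict.insert d a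
              (PySem.List.pyGetD pvCYCLE
                (PySem.Int.mod ((pre.countP pvIsDef : Nat) : Int)
                  (PySem.List.len pvCYCLE)) ""))
      rw [hcnt] at this
      simp only [List.append_assoc, List.cons_append, List.nil_append,
        List.length_append, List.length_cons, List.length_nil] at this
      rw [List.foldl_cons, List.foldl_cons, hstep, hB]
      rw [this]
      norm_num

-- ===== VERDICT (by name: the statement is the Claim_ definition above) =====
theorem build_brand_palette_spec : Claim_equal_build_brand_palette := by
  intro apps _
  unfold Spec_build_brand_palette build_brand_palette build_brand_palette_alt
  have h := pv_main apps [] PySem.Dict.empty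
  simp only [List.countP_nil, Nat.cast_zero, List.nil_append, List.length_nil] at h
  show (List.foldl pvStepA (PySem.Dict.empty, 0) apps).1.items
      = (List.foldl (pvStepB apps) PySem.Dict.empty (PySem.List.enumerate apps 0)).items
  rw [h]
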